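-- pv_equiv track=rewrite | github.com/FLCarpenter/PhyloCode | Recoder.py | RY_Recoding_Codon_NT
-- ===== SOURCE A (Python) =====
-- def RY_Recoding_Codon_NT(Sequence, Position):
--     Pos = int(Position)
--     Index = 1 + (3 - Pos)
--     recoded_seq = ''
--     for base in Sequence:
--         if (Index + 3) % 3 == 0:
--             if base in 'AGagRr':
--                 recoded_seq += 'R'
--             elif base in 'TCtcYy':
--                 recoded_seq += 'Y'
--             else:
--                 recoded_seq += '-'
--         else:
--             recoded_seq += base
--         Index += 1
--     return recoded_seq
-- ===== SOURCE B (Python) =====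
-- def RY_Recoding_Codon_NT(Sequence, Position):
--     # Strided chunking: copy the first `start` bases untouched, then handle
--     # the string in 3-base chunks, recoding only each chunk's first base.
--     start = (int(Position) - 1) % 3
--     parts = [Sequence[:start]]
--     i = start
--     n = len(Sequence)
--     while i < n:
--         b = Sequence[i]
--         if b in 'AGagRr':
--             parts.append('R')
--         elif b in 'TCtcYy':
--             parts.append('Y')
--         else:
--             parts.append('-')
--         parts.append(Sequence[i + 1:i + 3])
--         i += 3
--     return ''.join(parts)
-- ===== Notes on version B (the rewrite author's own statement) =====
-- stated objective: alternative
-- what changed: B computes the first recoded position start=(Position-1)%3 once and then walks the sequence in 3-base chunks, recoding only each chunk's leading base, instead of A's per-character (Index+3)%3 test with a running counter.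
import Mathlib
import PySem

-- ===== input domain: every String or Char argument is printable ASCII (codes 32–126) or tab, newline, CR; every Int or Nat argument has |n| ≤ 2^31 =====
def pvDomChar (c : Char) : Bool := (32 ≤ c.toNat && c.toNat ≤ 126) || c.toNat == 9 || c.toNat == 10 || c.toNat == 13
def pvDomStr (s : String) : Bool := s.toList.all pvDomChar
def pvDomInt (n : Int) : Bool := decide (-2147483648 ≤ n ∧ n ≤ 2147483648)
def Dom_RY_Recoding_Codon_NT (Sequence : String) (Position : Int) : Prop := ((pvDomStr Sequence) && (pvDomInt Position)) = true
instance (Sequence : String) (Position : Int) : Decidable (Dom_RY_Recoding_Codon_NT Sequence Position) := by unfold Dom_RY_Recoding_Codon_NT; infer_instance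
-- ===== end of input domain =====

-- B replaces A's per-character (Index+3)%3 test by a one-time start offset plus
-- 3-base chunking (objective: alternative decomposition, same O(n) cost).


-- ===== PORT A =====
-- the if/elif/else base mapping both Pythons spell out verbatim
def ryBase (base : Char) : Char :=
  if ("AGagRr".toList).contains base then 'R'
  else if ("TCtcYy".toList).contains base then 'Y'
  else '-'

-- A: Index starts at 1 + (3 - Pos); one pass, testing (Index + 3) % 3 == 0 per char
def RY_Recoding_Codon_NT (Sequence : String) (Position : Int) : String :=
  String.ofList (Sequence.toList.foldl (fun (st : Int × List Char) base =>
      if PySem.Int.mod (st.1 + 3) 3 = 0 then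
        (st.1 + 1, st.2 ++ [ryBase base])
      else
        (st.1 + 1, st.2 ++ [base])) (1 + (3 - Position), [])).2

-- ===== PORT B =====
-- the while loop of Source B as recursion on the remaining suffix: recode the
-- chunk's first base Sequence[i], copy Sequence[i+1:i+3], step i += 3
def ryChunks : List Char → List Char
  | [] => []
  | b :: t => (ryBase b :: t.take 2) ++ ryChunks (t.drop 2)
  termination_by l => l.length
  decreasing_by simp [List.length_drop]

-- start = (Position - 1) % 3 lies in [0,3), so Sequence[:start] is `take start`
def RY_Recoding_Codon_NT_alt (Sequence : String) (Position : Int) : String :=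
  String.ofList
    (Sequence.toList.take (PySem.Int.mod (Position - 1) 3).toNat
      ++ ryChunks (Sequence.toList.drop (PySem.Int.mod (Position - 1) 3).toNat))

-- ===== PRECONDITION & SPEC =====
def Spec_RY_Recoding_Codon_NT (Sequence : String) (Position : Int) (out : String) : Prop := out = RY_Recoding_Codon_NT_alt Sequence Position
instance (Sequence : String) (Position : Int) (out : String) : Decidable (Spec_RY_Recoding_Codon_NT Sequence Position out) := by unfold Spec_RY_Recoding_Codon_NT; infer_instance

-- ===== CLAIM (what is proved, stated in full; the proofs are below) =====
def Claim_equal_RY_Recoding_Codon_NT : Prop := ∀ (Sequence : String) (Position : Int), Dom_RY_Recoding_Codon_NT Sequence Position → Spec_RY_Recoding_Codon_NT Sequence Position (RY_Recoding_Codon_NT Sequence Position)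

-- ===== LEMMAS AND PROOFS =====

-- middle form both ports reduce to: k = distance to the next recoded position
def rySpec : Nat → List Char → List Char
  | _, [] => []
  | 0, b :: t => ryBase b :: rySpec 2 t
  | Nat.succ k, b :: t => b :: rySpec k t

theorem ryA_fold (l : List Char) : ∀ (Index : Int) (acc : List Char),
    (l.foldl (fun (st : Int × List Char) base =>
      if PySem.Int.mod (st.1 + 3) 3 = 0 then
        (st.1 + 1, st.2 ++ [ryBase base])
      else
        (st.1 + 1, st.2 ++ [base])) (Index, acc)).2
    = acc ++ rySpec (PySem.Int.mod (-Index) 3).toNat l := by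
  induction l with
  | nil => intro Index acc; simp [rySpec]
  | cons b t ih =>
    intro Index acc
    have h3 : (0:Int) < 3 := by norm_num
    by_cases hc : PySem.Int.mod (Index + 3) 3 = 0
    · have h0 : (PySem.Int.mod (-Index) 3).toNat = 0 := by
        rw [PySem.Int.mod_eq_emod_of_pos h3] at hc ⊢
        omega
      have h2 : (PySem.Int.mod (-(Index + 1)) 3).toNat = 2 := by
        rw [PySem.Int.mod_eq_emod_of_pos h3] at hc ⊢
        omega
      rw [List.foldl_cons, if_pos hc, ih, h2, h0]
      simp [rySpec]
    · obtain ⟨k, hk⟩ : ∃ k : Nat, (PySem.Int.mod (-Index) 3).toNat = k + 1 := by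
        rw [PySem.Int.mod_eq_emod_of_pos h3] at hc ⊢
        refine ⟨((-Index) % 3).toNat - 1, ?_⟩
        omega
      have hk' : (PySem.Int.mod (-(Index + 1)) 3).toNat = k := by
        rw [PySem.Int.mod_eq_emod_of_pos h3] at hk ⊢
        omega
      rw [List.foldl_cons, if_neg hc, ih, hk', hk]
      simp [rySpec]

theorem ryB_chunks (l : List Char) : ∀ (k : Nat), k ≤ 2 →
    l.take k ++ ryChunks (l.drop k) = rySpec k l := by
  induction l with
  | nil => intro k _; rw [ryChunks.eq_def]; simp [rySpec]
  | cons b t ih =>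
    intro k hk
    match k with
    | 0 =>
      rw [List.take_zero, List.drop_zero, List.nil_append, ryChunks.eq_def]
      simp only [rySpec, List.cons_append]
      rw [ih 2 (by omega)]
    | Nat.succ j =>
      simp only [List.take_succ_cons, List.drop_succ_cons, rySpec,
        List.cons_append]
      rw [ih j (by omega)]

theorem ry_start_eq (Position : Int) :
    (PySem.Int.mod (-(1 + (3 - Position))) 3).toNat
      = (PySem.Int.mod (Position - 1) 3).toNat := by
  rw [PySem.Int.mod_eq_emod_of_pos (by norm_num),
    PySem.Int.mod_eq_emod_of_pos (by norm_num)]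
  omega

-- ===== VERDICT (by name: the statement is the Claim_ definition above) =====
theorem RY_Recoding_Codon_NT_spec : Claim_equal_RY_Recoding_Codon_NT := by
  intro Sequence Position _
  unfold Spec_RY_Recoding_Codon_NT RY_Recoding_Codon_NT RY_Recoding_Codon_NT_alt
  have hle : (PySem.Int.mod (Position - 1) 3).toNat ≤ 2 := by
    have := PySem.Int.mod_lt (Position - 1) (b := 3) (by norm_num)
    have := PySem.Int.mod_nonneg (Position - 1) (b := 3) (by norm_num)
    omega
  rw [ryA_fold, ry_start_eq, ryB_chunks _ _ hle, List.nil_append]
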